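-- pv_equiv track=rewrite | github.com/AISecurityConsortium/AIGoat | app/core/token_utils.py | truncate_chunks_to_budget
-- ===== SOURCE A (Python) =====
-- import math
--
-- def estimate_tokens(text: str) -> int:
--     """Return an approximate token count for the given text.
--
--     Uses a 1 token per 0.75 words heuristic (conservative for English).
--     """
--     word_count = len(text.split())
--     return math.ceil(word_count / 0.75)
--
-- def truncate_chunks_to_budget(chunks: list[str], max_tokens: int) -> list[str]:
--     """Keep chunks (in retrieval-score order) until the token budget is exhausted.
--
--     Returns the prefix of chunks that fit within *max_tokens*.
--     """
--     kept: list[str] = []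
--     used = 0
--     for chunk in chunks:
--         cost = estimate_tokens(chunk)
--         if used + cost > max_tokens and kept:
--             break
--         kept.append(chunk)
--         used += cost
--     return kept
-- ===== SOURCE B (Python) =====
-- import math
--
--
-- def estimate_tokens(text: str) -> int:
--     """Return an approximate token count for the given text.
--
--     Uses a 1 token per 0.75 words heuristic (conservative for English).
--     """
--     word_count = len(text.split())
--     return math.ceil(word_count / 0.75)
--
--
-- def truncate_chunks_to_budget(chunks: list[str], max_tokens: int) -> list[str]:
--     """Keep the prefix of chunks fitting the token budget (first chunk always kept)."""
--     # Build the prefix-sum table of token costs.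
--     sums = []
--     total = 0
--     for chunk in chunks:
--         total += estimate_tokens(chunk)
--         sums.append(total)
--     # Since costs are non-negative, sums is monotone: the number of prefix sums
--     # within budget is exactly the cutoff index.
--     k = sum(1 for s in sums if s <= max_tokens)
--     if chunks and k == 0:
--         k = 1  # the first chunk is kept even if it alone exceeds the budget
--     return chunks[:k]
-- ===== Notes on version B (the rewrite author's own statement) =====
-- stated objective: alternative
-- what changed: Replaces A's accumulate-and-break loop carrying (kept, used) state with a build-the-prefix-sum-table-then-count-the-within-budget-sums-then-slice decomposition.
import Mathlib
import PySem

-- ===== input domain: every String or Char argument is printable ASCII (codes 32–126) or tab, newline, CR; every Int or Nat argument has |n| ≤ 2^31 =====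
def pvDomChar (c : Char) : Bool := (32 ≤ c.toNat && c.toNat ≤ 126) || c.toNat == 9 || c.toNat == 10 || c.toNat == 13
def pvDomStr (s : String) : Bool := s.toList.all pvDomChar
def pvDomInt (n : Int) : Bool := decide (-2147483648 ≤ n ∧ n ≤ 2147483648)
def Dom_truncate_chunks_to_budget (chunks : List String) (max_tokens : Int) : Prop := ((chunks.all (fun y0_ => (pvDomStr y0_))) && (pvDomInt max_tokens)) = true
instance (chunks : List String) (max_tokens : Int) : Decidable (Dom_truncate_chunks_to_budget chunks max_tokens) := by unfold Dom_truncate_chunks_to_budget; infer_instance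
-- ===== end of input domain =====

-- B replaces A's accumulate-and-break loop with a prefix-sum table + count + slice decomposition (alternative, same cost).


-- ===== PORT A =====
-- estimate_tokens: word_count = len(text.split()); ceil(word_count / 0.75).
-- Ported exactly as ceil(4*w/3) = (4*w + 2) / 3 for w ≥ 0: the Python float division
-- w / 0.75 (0.75 is exact in binary) has relative error 2^-53, far smaller than the
-- distance 1/3 to the next integer, so math.ceil of it equals the exact ceiling.
def estimate_tokens (text : String) : Int :=
  (4 * ((PySem.Str.split₀ text).length : Int) + 2) / 3

def tcb_loop (max_tokens : Int) (kept : List String) (used : Int) : List String → List String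
  | [] => kept
  | chunk :: rest =>
    let cost := estimate_tokens chunk
    if used + cost > max_tokens ∧ kept ≠ [] then kept
    else tcb_loop max_tokens (kept ++ [chunk]) (used + cost) rest

def truncate_chunks_to_budget (chunks : List String) (max_tokens : Int) : List String :=
  tcb_loop max_tokens [] 0 chunks

-- ===== PORT B =====
-- prefix-sum table of token costs (Source B's sums list)
def tcb_sums (total : Int) : List String → List Int
  | [] => []
  | chunk :: rest =>
    let t := total + estimate_tokens chunk
    t :: tcb_sums t rest

def truncate_chunks_to_budget_alt (chunks : List String) (max_tokens : Int) : List String :=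
  let sums := tcb_sums 0 chunks
  let k : Nat := sums.countP (fun s => decide (s ≤ max_tokens))
  let k := if chunks ≠ [] ∧ k = 0 then 1 else k
  chunks.take k

-- ===== PRECONDITION & SPEC =====
def Spec_truncate_chunks_to_budget (chunks : List String) (max_tokens : Int) (out : List String) : Prop := out = truncate_chunks_to_budget_alt chunks max_tokens
instance (chunks : List String) (max_tokens : Int) (out : List String) : Decidable (Spec_truncate_chunks_to_budget chunks max_tokens out) := by unfold Spec_truncate_chunks_to_budget; infer_instance

-- ===== CLAIM (what is proved, stated in full; the proofs are below) =====
def Claim_equal_truncate_chunks_to_budget : Prop := ∀ (chunks : List String) (max_tokens : Int), Dom_truncate_chunks_to_budget chunks max_tokens → Spec_truncate_chunks_to_budget chunks max_tokens (truncate_chunks_to_budget chunks max_tokens)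

-- ===== LEMMAS AND PROOFS =====

theorem estimate_tokens_nonneg (s : String) : 0 ≤ estimate_tokens s := by
  unfold estimate_tokens
  have : (0 : Int) ≤ 4 * ((PySem.Str.split₀ s).length : Int) + 2 := by positivity
  exact Int.ediv_nonneg this (by norm_num)

-- every entry of the prefix-sum table starting at t is ≥ t
theorem tcb_sums_ge (rest : List String) (t : Int) :
    ∀ s ∈ tcb_sums t rest, t ≤ s := by
  induction rest generalizing t with
  | nil => simp [tcb_sums]
  | cons c r ih =>
    intro s hs
    simp only [tcb_sums, List.mem_cons] at hs
    have hc := estimate_tokens_nonneg c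
    rcases hs with rfl | hs
    · omega
    · have := ih (t + estimate_tokens c) s hs; omega

theorem tcb_sums_count_zero (max_tokens : Int) (rest : List String) (t : Int)
    (h : max_tokens < t) :
    (tcb_sums t rest).countP (fun s => decide (s ≤ max_tokens)) = 0 := by
  rw [List.countP_eq_zero]
  intro s hs
  have := tcb_sums_ge rest t s hs
  simp only [decide_eq_true_eq]
  omega

-- loop invariant: with a non-empty kept prefix, A's loop appends exactly the
-- chunks whose prefix sums (starting from used) stay within budget
theorem tcb_loop_eq (max_tokens : Int) (rest : List String) :
    ∀ (kept : List String) (used : Int), kept ≠ [] →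
    tcb_loop max_tokens kept used rest =
      kept ++ rest.take ((tcb_sums used rest).countP (fun s => decide (s ≤ max_tokens))) := by
  induction rest with
  | nil => intro kept used _; simp [tcb_loop, tcb_sums]
  | cons c r ih =>
    intro kept used hk
    simp only [tcb_loop, tcb_sums]
    by_cases hgt : used + estimate_tokens c > max_tokens
    · rw [if_pos ⟨hgt, hk⟩]
      rw [List.countP_cons_of_neg (by simp; omega),
        tcb_sums_count_zero max_tokens r _ (by omega)]
      simp
    · rw [if_neg (by tauto)]
      rw [ih (kept ++ [c]) (used + estimate_tokens c) (by simp)]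
      rw [List.countP_cons_of_pos (by simp; omega)]
      simp

-- ===== VERDICT (by name: the statement is the Claim_ definition above) =====
theorem truncate_chunks_to_budget_spec : Claim_equal_truncate_chunks_to_budget := by
  intro chunks max_tokens _
  unfold Spec_truncate_chunks_to_budget truncate_chunks_to_budget truncate_chunks_to_budget_alt
  cases chunks with
  | nil => simp [tcb_loop, tcb_sums]
  | cons c rest =>
    simp only [tcb_loop]
    rw [if_neg (by simp)]
    rw [tcb_loop_eq max_tokens rest ([] ++ [c]) (0 + estimate_tokens c) (by simp)]
    simp only [List.nil_append, tcb_sums]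
    by_cases hle : estimate_tokens c ≤ max_tokens
    · rw [List.countP_cons_of_pos (by simp; omega)]
      rw [if_neg (by simp)]
      simp
    · rw [List.countP_cons_of_neg (by simp; omega),
        tcb_sums_count_zero max_tokens rest (0 + estimate_tokens c) (by omega)]
      rw [if_pos (by simp)]
      simp
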